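-- pv_equiv track=rewrite | github.com/shraddhapiparia/sc-cell-state-benchmark | scripts/05_annotate_clusters.py | predict_cell_type
-- ===== SOURCE A (Python) =====
-- CELL_TYPE_RULES = {
--     'CD4 T cell': {'CD3D', 'IL7R', 'CD4', 'LTB'},
--     'CD8 T cell': {'CD3D', 'CD8A', 'NKG7', 'CST7'},
--     'B cell':     {'MS4A1', 'CD79A', 'CD74', 'HLA-DRA'},
--     'NK cell':    {'NKG7', 'GNLY', 'KLRD1'},
--     'Monocyte':   {'LYZ', 'CST3', 'FCN1', 'S100A8', 'FCGR3A'},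
--     'Dendritic cell': {'FCER1A', 'CST3', 'HLA-DRA'},
--     'Platelet':   {'PPBP', 'PF4'},
-- }
--
-- def predict_cell_type(marker_genes):
--     """Predict the cell type for a cluster using simple marker rules."""
--     scores = {}
--     for cell_type, markers in CELL_TYPE_RULES.items():
--         scores[cell_type] = len(set(marker_genes) & markers)
--
--     best_type = max(scores, key=scores.get)
--     best_score = scores[best_type]
--     counts = list(scores.values())
--
--     if best_score == 0 or counts.count(best_score) > 1:
--         return 'Unknown'
--     return best_type
-- ===== SOURCE B (Python) =====
-- CELL_TYPE_RULES = {
--     'CD4 T cell': {'CD3D', 'IL7R', 'CD4', 'LTB'},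
--     'CD8 T cell': {'CD3D', 'CD8A', 'NKG7', 'CST7'},
--     'B cell':     {'MS4A1', 'CD79A', 'CD74', 'HLA-DRA'},
--     'NK cell':    {'NKG7', 'GNLY', 'KLRD1'},
--     'Monocyte':   {'LYZ', 'CST3', 'FCN1', 'S100A8', 'FCGR3A'},
--     'Dendritic cell': {'FCER1A', 'CST3', 'HLA-DRA'},
--     'Platelet':   {'PPBP', 'PF4'},
-- }
--
-- def predict_cell_type(marker_genes):
--     """Predict the cell type for a cluster using simple marker rules."""
--     genes = set(marker_genes)
--     best_score = -1
--     best_type = ''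
--     tie = False
--     for cell_type, markers in CELL_TYPE_RULES.items():
--         overlap = len(genes & markers)
--         if overlap > best_score:
--             best_score, best_type, tie = overlap, cell_type, False
--         elif overlap == best_score:
--             tie = True
--     if best_score == 0 or tie:
--         return 'Unknown'
--     return best_type
-- ===== Notes on version B (the rewrite author's own statement) =====
-- stated objective: simpler
-- what changed: Replaced the build-scores-dict / max(scores, key=...) / counts.count structure by a single running-best pass over CELL_TYPE_RULES that keeps (best_score, best_type, tie) and hashes the marker genes once.
import Mathlib
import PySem

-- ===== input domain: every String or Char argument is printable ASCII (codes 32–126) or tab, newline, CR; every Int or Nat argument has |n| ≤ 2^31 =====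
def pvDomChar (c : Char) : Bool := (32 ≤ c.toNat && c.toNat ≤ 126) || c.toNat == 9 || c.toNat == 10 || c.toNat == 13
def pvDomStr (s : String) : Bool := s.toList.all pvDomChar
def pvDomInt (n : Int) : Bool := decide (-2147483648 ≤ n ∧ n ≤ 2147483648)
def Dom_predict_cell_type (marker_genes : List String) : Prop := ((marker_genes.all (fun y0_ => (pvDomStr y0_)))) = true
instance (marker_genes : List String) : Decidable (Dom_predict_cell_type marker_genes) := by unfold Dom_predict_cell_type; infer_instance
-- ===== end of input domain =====

-- B replaces A's build-scores-dict / max(scores, key=…) / counts.count() structure by a single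
-- running-best pass over the rules keeping (best_score, best_type, tie); objective: simpler.

-- CELL_TYPE_RULES (module constant; marker sets written as lists of their distinct elements —
-- only the size of an intersection with them is ever used, so their order is immaterial)
def pvRules : List (String × List String) :=
  [("CD4 T cell", ["CD3D", "IL7R", "CD4", "LTB"]),
   ("CD8 T cell", ["CD3D", "CD8A", "NKG7", "CST7"]),
   ("B cell", ["MS4A1", "CD79A", "CD74", "HLA-DRA"]),
   ("NK cell", ["NKG7", "GNLY", "KLRD1"]),
   ("Monocyte", ["LYZ", "CST3", "FCN1", "S100A8", "FCGR3A"]),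
   ("Dendritic cell", ["FCER1A", "CST3", "HLA-DRA"]),
   ("Platelet", ["PPBP", "PF4"])]

-- ===== PORT A =====
def predict_cell_type (marker_genes : List String) : String :=
  let scores : PySem.Dict String Int :=
    pvRules.foldl (fun d p =>
      PySem.Dict.insert d p.1
        (PySem.Set.len (PySem.Set.inter (PySem.Set.ofList marker_genes) p.2))) ⟨[]⟩
  match PySem.List.max? (PySem.Dict.keys scores) (fun k => PySem.Dict.getD scores k 0) with
  | none => ""   -- unreachable totality guard: CELL_TYPE_RULES is nonempty, so max() never raises
  | some best_type =>
      let best_score := PySem.Dict.getD scores best_type 0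
      let counts := PySem.Dict.values scores
      if best_score = 0 ∨ PySem.List.count counts best_score > 1 then "Unknown" else best_type

-- ===== PORT B =====
def predict_cell_type_alt (marker_genes : List String) : String :=
  let genes := PySem.Set.ofList marker_genes
  let st : Int × String × Bool :=
    pvRules.foldl (fun st p =>
      let overlap := PySem.Set.len (PySem.Set.inter genes p.2)
      if overlap > st.1 then (overlap, p.1, false)
      else if overlap = st.1 then (st.1, st.2.1, true)
      else st) (-1, "", false)
  if st.1 = 0 ∨ st.2.2 = true then "Unknown" else st.2.1

-- ===== PRECONDITION & SPEC =====
def Spec_predict_cell_type (marker_genes : List String) (out : String) : Prop := out = predict_cell_type_alt marker_genes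
instance (marker_genes : List String) (out : String) : Decidable (Spec_predict_cell_type marker_genes out) := by unfold Spec_predict_cell_type; infer_instance

-- ===== CLAIM (what is proved, stated in full; the proofs are below) =====
def Claim_equal_predict_cell_type : Prop := ∀ (marker_genes : List String), Dom_predict_cell_type marker_genes → Spec_predict_cell_type marker_genes (predict_cell_type marker_genes)

-- ===== LEMMAS AND PROOFS =====

-- B's loop body as a function of (state, (cell_type, score)); only the proofs use it.
def pvStep (st : Int × String × Bool) (p : String × Int) : Int × String × Bool :=
  if p.2 > st.1 then (p.2, p.1, false)
  else if p.2 = st.1 then (st.1, st.2.1, true)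
  else st

-- the step function of PySem.List.max? (proof-side only)
def pvMaxStep {α : Type} (f : α → Int) (acc : Option α) (x : α) : Option α :=
  match acc with
  | none => some x
  | some m => if f m < f x then some x else some m

theorem pv_maxStep_foldl_congr {α : Type} (xs : List α) (f g : α → Int)
    (h : ∀ x ∈ xs, f x = g x) : ∀ acc : Option α, (∀ m, acc = some m → f m = g m) →
    xs.foldl (pvMaxStep f) acc = xs.foldl (pvMaxStep g) acc := by
  induction xs with
  | nil => intro acc _; rfl
  | cons x t ih =>
    intro acc hacc
    have hx : f x = g x := h x (by simp)
    have ht : ∀ y ∈ t, f y = g y := fun y hy => h y (by simp [hy])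
    simp only [List.foldl_cons]
    cases acc with
    | none =>
      show t.foldl (pvMaxStep f) (some x) = t.foldl (pvMaxStep g) (some x)
      exact ih ht (some x) (fun m hm => by injection hm with hm'; subst hm'; exact hx)
    | some m' =>
      have hm' : f m' = g m' := hacc m' rfl
      have he : pvMaxStep f (some m') x = pvMaxStep g (some m') x := by
        simp [pvMaxStep, hm', hx]
      rw [he]
      refine ih ht _ (fun m hm => ?_)
      by_cases hc : g m' < g x
      · simp [pvMaxStep, hc] at hm; subst hm; exact hx
      · simp [pvMaxStep, hc] at hm; subst hm; exact hm'

theorem pv_max?_congr {α : Type} (xs : List α) (f g : α → Int)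
    (h : ∀ x ∈ xs, f x = g x) : PySem.List.max? xs f = PySem.List.max? xs g := by
  unfold PySem.List.max?
  exact pv_maxStep_foldl_congr xs f g h none (by simp)

-- getD on an association list whose key occurs in the first block
theorem pv_getD_append_left (M rest : List (String × Int)) (k : String)
    (hk : k ∈ M.map Prod.fst) :
    PySem.Dict.getD (⟨M ++ rest⟩ : PySem.Dict String Int) k 0 =
    PySem.Dict.getD (⟨M⟩ : PySem.Dict String Int) k 0 := by
  simp only [PySem.Dict.getD, PySem.Dict.get?, List.find?_append]
  have : (M.find? (fun p => p.1 == k)).isSome := by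
    rw [List.find?_isSome]
    obtain ⟨p, hp, hpk⟩ := List.mem_map.mp hk
    exact ⟨p, hp, by simp [hpk]⟩
  obtain ⟨v, hv⟩ := Option.isSome_iff_exists.mp this
  simp [hv]

theorem pv_getD_append_fresh (M : List (String × Int)) (c : String) (s : Int)
    (hc : c ∉ M.map Prod.fst) :
    PySem.Dict.getD (⟨M ++ [(c, s)]⟩ : PySem.Dict String Int) c 0 = s := by
  simp only [PySem.Dict.getD, PySem.Dict.get?, List.find?_append]
  have : M.find? (fun p => p.1 == c) = none := by
    rw [List.find?_eq_none]
    intro p hp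
    simp only [beq_iff_eq]
    intro h
    exact hc (List.mem_map.mpr ⟨p, hp, h⟩)
  simp [this]

-- Core invariant: on any nonempty rules-with-scores list with distinct keys and nonnegative
-- scores, B's running-best state is exactly (A's max-by-lookup key, its score, the tie flag),
-- the score occurs in the value list, and it bounds every value.
theorem pv_core (L : List (String × Int)) (hk : (L.map Prod.fst).Nodup)
    (hpos : ∀ p ∈ L, 0 ≤ p.2) (hne : L ≠ []) :
    PySem.List.max? (L.map Prod.fst)
        (fun k => PySem.Dict.getD (⟨L⟩ : PySem.Dict String Int) k 0) =
      some (L.foldl pvStep (-1, "", false)).2.1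
    ∧ PySem.Dict.getD (⟨L⟩ : PySem.Dict String Int) (L.foldl pvStep (-1, "", false)).2.1 0 =
      (L.foldl pvStep (-1, "", false)).1
    ∧ (PySem.List.count (L.map Prod.snd) (L.foldl pvStep (-1, "", false)).1 > 1 ↔
      (L.foldl pvStep (-1, "", false)).2.2 = true)
    ∧ (L.foldl pvStep (-1, "", false)).1 ∈ L.map Prod.snd
    ∧ (∀ v ∈ L.map Prod.snd, v ≤ (L.foldl pvStep (-1, "", false)).1) := by
  induction L using List.reverseRecOn with
  | nil => exact absurd rfl hne
  | append_singleton M x ih =>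
    obtain ⟨c, s⟩ := x
    rcases eq_or_ne M [] with hM | hM
    · subst hM
      have hs : 0 ≤ s := hpos (c, s) (by simp)
      have hstep : ([((c : String), (s : Int))].foldl pvStep ((-1 : Int), ("" : String), false)) = (s, c, false) := by
        simp [pvStep, show s > (-1 : Int) by omega]
      refine ⟨?_, ?_, ?_, ?_, ?_⟩ <;>
        simp [hstep, PySem.List.max?, PySem.Dict.getD, PySem.Dict.get?, PySem.List.count]
    · have hkM : (M.map Prod.fst).Nodup := by
        simp only [List.map_append, List.nodup_append] at hk; exact hk.1
      have hcM : c ∉ M.map Prod.fst := by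
        simp only [List.map_append, List.nodup_append] at hk
        intro hmem; exact hk.2.2 c hmem c (by simp) rfl
      have hposM : ∀ p ∈ M, 0 ≤ p.2 := fun p hp => hpos p (by simp [hp])
      obtain ⟨h1, h2, h3, h5, h4⟩ := ih hkM hposM hM
      set st := M.foldl pvStep (-1, "", false) with hst
      obtain ⟨bs, bt, tie⟩ := st
      simp only at h1 h2 h3 h4 h5
      have hfold : ((M ++ [(c, s)]).foldl pvStep ((-1 : Int), ("" : String), false)) = pvStep (bs, bt, tie) (c, s) := by
        rw [List.foldl_append, ← hst]
        simp [List.foldl_cons, List.foldl_nil]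
      have hbtM : bt ∈ M.map Prod.fst := by
        have := PySem.List.max?_mem h1; simpa using this
      have hgbt : PySem.Dict.getD (⟨M ++ [(c, s)]⟩ : PySem.Dict String Int) bt 0 = bs := by
        rw [pv_getD_append_left M [(c, s)] bt hbtM]; exact h2
      have hgc : PySem.Dict.getD (⟨M ++ [(c, s)]⟩ : PySem.Dict String Int) c 0 = s :=
        pv_getD_append_fresh M c s hcM
      have hmax : PySem.List.max? ((M ++ [(c, s)]).map Prod.fst)
          (fun k => PySem.Dict.getD (⟨M ++ [(c, s)]⟩ : PySem.Dict String Int) k 0) =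
          (if bs < s then some c else some bt) := by
        have hcong : PySem.List.max? (M.map Prod.fst)
            (fun k => PySem.Dict.getD (⟨M ++ [(c, s)]⟩ : PySem.Dict String Int) k 0) =
            PySem.List.max? (M.map Prod.fst)
            (fun k => PySem.Dict.getD (⟨M⟩ : PySem.Dict String Int) k 0) :=
          pv_max?_congr _ _ _ (fun k hkmem => pv_getD_append_left M [(c, s)] k hkmem)
        simp only [List.map_append]
        unfold PySem.List.max? at hcong h1 ⊢
        rw [List.foldl_append, hcong, h1]
        simp [hgbt, hgc]
      rw [hfold]
      rcases lt_trichotomy bs s with hlt | heq | hgt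
      · -- strictly better score: new leader, tie flag reset
        have hstep : pvStep (bs, bt, tie) (c, s) = (s, c, false) := by
          simp only [pvStep, if_pos (show s > bs from hlt)]
        rw [hstep]
        have hnot : s ∉ M.map Prod.snd := fun hmem => absurd (h4 s hmem) (by omega)
        have h0 : List.count s (M.map Prod.snd) = 0 := List.count_eq_zero.mpr hnot
        refine ⟨?_, ?_, ?_, ?_, ?_⟩
        · rw [hmax, if_pos hlt]
        · exact hgc
        · show PySem.List.count (List.map Prod.snd (M ++ [(c, s)])) s > 1 ↔ (false = true)
          simp [PySem.List.count, List.count_append, h0]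
        · show s ∈ List.map Prod.snd (M ++ [(c, s)])
          simp
        · intro v hv
          simp only [List.map_append, List.mem_append] at hv
          rcases hv with hv | hv
          · have := h4 v hv
            show v ≤ s
            omega
          · simp at hv
            show v ≤ s
            omega
      · -- equal score: tie flag set
        have hstep : pvStep (bs, bt, tie) (c, s) = (bs, bt, true) := by
          simp only [pvStep, if_neg (show ¬ s > bs by omega), if_pos heq.symm]
        rw [hstep]
        have hm1 : 1 ≤ List.count bs (M.map Prod.snd) := List.one_le_count_iff.mpr h5
        have hcount : PySem.List.count (List.map Prod.snd (M ++ [(c, s)])) bs =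
            List.count bs (M.map Prod.snd) + 1 := by
          simp [PySem.List.count, List.count_append, heq]
        refine ⟨?_, ?_, ?_, ?_, ?_⟩
        · rw [hmax, if_neg (by omega)]
        · exact hgbt
        · show PySem.List.count (List.map Prod.snd (M ++ [(c, s)])) bs > 1 ↔ (true = true)
          rw [hcount]
          constructor
          · intro _; rfl
          · intro _; omega
        · show bs ∈ List.map Prod.snd (M ++ [(c, s)])
          rw [List.map_append]
          exact List.mem_append.mpr (Or.inl h5)
        · intro v hv
          simp only [List.map_append, List.mem_append] at hv
          rcases hv with hv | hv
          · exact h4 v hv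
          · simp at hv
            show v ≤ bs
            omega
      · -- worse score: state unchanged
        have hstep : pvStep (bs, bt, tie) (c, s) = (bs, bt, tie) := by
          simp only [pvStep, if_neg (show ¬ s > bs by omega), if_neg (show ¬ s = bs by omega)]
        rw [hstep]
        have hcnt : PySem.List.count (List.map Prod.snd (M ++ [(c, s)])) bs =
            PySem.List.count (List.map Prod.snd M) bs := by
          simp [PySem.List.count, List.count_append, show ¬ s = bs by omega]
        refine ⟨?_, ?_, ?_, ?_, ?_⟩
        · rw [hmax, if_neg (by omega)]
        · exact hgbt
        · show PySem.List.count (List.map Prod.snd (M ++ [(c, s)])) bs > 1 ↔ (tie = true)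
          rw [hcnt]; exact h3
        · show bs ∈ List.map Prod.snd (M ++ [(c, s)])
          rw [List.map_append]
          exact List.mem_append.mpr (Or.inl h5)
        · intro v hv
          simp only [List.map_append, List.mem_append] at hv
          rcases hv with hv | hv
          · exact h4 v hv
          · simp at hv
            show v ≤ bs
            omega

-- ===== VERDICT (by name: the statement is the Claim_ definition above) =====
theorem predict_cell_type_spec : Claim_equal_predict_cell_type := by
  intro marker_genes _
  unfold Spec_predict_cell_type predict_cell_type predict_cell_type_alt
  set L : List (String × Int) := pvRules.map (fun p =>
      (p.1, PySem.Set.len (PySem.Set.inter (PySem.Set.ofList marker_genes) p.2))) with hL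
  -- A's dict of scores is literally L (the seven keys are distinct, so every insert appends)
  have hdict : pvRules.foldl (fun d p =>
      PySem.Dict.insert d p.1
        (PySem.Set.len (PySem.Set.inter (PySem.Set.ofList marker_genes) p.2)))
      (⟨[]⟩ : PySem.Dict String Int) = ⟨L⟩ := by
    simp [hL, pvRules, PySem.Dict.insert, PySem.Dict.contains]
  -- B's fold over pvRules is the pvStep fold over L
  have hBfold : (pvRules.foldl (fun st (p : String × List String) =>
      if PySem.Set.len (PySem.Set.inter (PySem.Set.ofList marker_genes) p.2) > st.1 then
        (PySem.Set.len (PySem.Set.inter (PySem.Set.ofList marker_genes) p.2), p.1, false)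
      else if PySem.Set.len (PySem.Set.inter (PySem.Set.ofList marker_genes) p.2) = st.1 then
        (st.1, st.2.1, true)
      else st) ((-1 : Int), ("" : String), false)) = L.foldl pvStep (-1, "", false) := by
    rw [hL, List.foldl_map]; rfl
  have hkeys : L.map Prod.fst = ["CD4 T cell", "CD8 T cell", "B cell", "NK cell",
      "Monocyte", "Dendritic cell", "Platelet"] := by
    rw [hL]; rfl
  have hk : (L.map Prod.fst).Nodup := by rw [hkeys]; decide
  have hpos : ∀ p ∈ L, 0 ≤ p.2 := by
    intro p hp
    rw [hL] at hp
    obtain ⟨q, _, rfl⟩ := List.mem_map.mp hp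
    simp [PySem.Set.len]
  have hne : L ≠ [] := by rw [hL]; simp [pvRules]
  obtain ⟨h1, h2, h3, -, -⟩ := pv_core L hk hpos hne
  have e1 : (List.map (fun x : String × Int => x.1) L) = L.map Prod.fst := rfl
  have e2 : (List.map (fun x : String × Int => x.2) L) = L.map Prod.snd := rfl
  simp only [hdict, hBfold, PySem.Dict.keys, PySem.Dict.values, e1, e2, h1, h2]
  exact if_congr (or_congr Iff.rfl h3) rfl rfl
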